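-- pv_equiv track=rewrite | github.com/JackZhang9/my_python | python继承测试.py | work_hours
-- ===== SOURCE A (Python) =====
-- def work_hours(work_place):
--     hours = 0
--     for i in range(365):
--         if work_place == 'shenzhen':
--             hours += 11
--         else:
--             hours += 10
--     return hours
-- ===== SOURCE B (Python) =====
-- def work_hours(work_place):
--     return 365 * (11 if work_place == 'shenzhen' else 10)
-- ===== Notes on version B (the rewrite author's own statement) =====
-- stated objective: simpler
-- what changed: Replaced the 365-iteration accumulation loop with a closed-form expression: the per-day rate is chosen once and multiplied by 365.
import Mathlib
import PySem

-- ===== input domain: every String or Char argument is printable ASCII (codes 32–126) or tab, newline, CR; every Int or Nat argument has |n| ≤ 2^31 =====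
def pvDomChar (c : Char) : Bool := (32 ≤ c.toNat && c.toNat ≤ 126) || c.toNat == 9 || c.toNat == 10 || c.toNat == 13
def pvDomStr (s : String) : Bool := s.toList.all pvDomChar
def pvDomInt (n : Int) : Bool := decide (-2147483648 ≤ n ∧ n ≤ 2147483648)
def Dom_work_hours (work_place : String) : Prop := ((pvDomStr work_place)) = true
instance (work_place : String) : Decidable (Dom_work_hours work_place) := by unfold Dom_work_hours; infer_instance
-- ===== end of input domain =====

-- B replaces A's 365-iteration accumulation loop with a closed-form product (simpler).

-- ===== PORT A =====
def work_hours (work_place : String) : Int :=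
  (PySem.List.pyRange 0 365 1).foldl
    (fun hours _ => if work_place = "shenzhen" then hours + 11 else hours + 10) 0

-- ===== PORT B =====
def work_hours_alt (work_place : String) : Int :=
  365 * (if work_place = "shenzhen" then 11 else 10)

-- ===== PRECONDITION & SPEC =====
def Spec_work_hours (work_place : String) (out : Int) : Prop := out = work_hours_alt work_place
instance (work_place : String) (out : Int) : Decidable (Spec_work_hours work_place out) := by unfold Spec_work_hours; infer_instance

-- ===== CLAIM (what is proved, stated in full; the proofs are below) =====
def Claim_equal_work_hours : Prop := ∀ (work_place : String), Dom_work_hours work_place → Spec_work_hours work_place (work_hours work_place)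

-- ===== LEMMAS AND PROOFS =====
theorem foldl_const_add (c : Int) (l : List Int) (init : Int) :
    l.foldl (fun h _ => h + c) init = init + l.length * c := by
  induction l generalizing init with
  | nil => simp
  | cons x xs ih => simp [List.foldl, ih]; ring

-- ===== VERDICT (by name: the statement is the Claim_ definition above) =====
theorem work_hours_spec : Claim_equal_work_hours := by
  intro wp _
  unfold Spec_work_hours work_hours work_hours_alt
  by_cases h : wp = "shenzhen" <;> simp [h, foldl_const_add]
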